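-- pv_equiv track=rewrite | github.com/erockpmz/musicscanner | artist_to_walkman_v0_1_1.py | choose_best_release
-- ===== SOURCE A (Python) =====
-- from typing import Dict, List, Optional, Sequence, Tuple
--
-- def choose_best_release(releases: List[dict], allowed_statuses: Sequence[str]) -> Optional[dict]:
--     if not releases:
--         return None
--     allowed = {x.casefold() for x in allowed_statuses}
--
--     def score(r: dict) -> Tuple[int, int, int, str]:
--         status = (r.get("status") or "").casefold()
--         status_bonus = 10 if status in allowed else 0
--         disambig_bonus = 0 if r.get("disambiguation") else 1
--         country_bonus = 1 if r.get("country") else 0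
--         date = r.get("date") or "9999-99-99"
--         return (status_bonus, disambig_bonus, country_bonus, date)
--
--     releases_sorted = sorted(releases, key=score, reverse=True)
--     for r in releases_sorted:
--         if (r.get("status") or "").casefold() in allowed:
--             return r
--     return releases_sorted[0]
-- ===== SOURCE B (Python) =====
-- from typing import List, Optional, Sequence, Tuple
--
-- def choose_best_release(releases: List[dict], allowed_statuses: Sequence[str]) -> Optional[dict]:
--     # Two-stage strategy: first restrict to the allowed-status releases (they all
--     # dominate the rest), then take the argmax of a status-free 3-part sub-score
--     # over that pool (or over everything when no status is allowed).  No sort,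
--     # no 4-tuple, no second scan.
--     if not releases:
--         return None
--     allowed = {x.casefold() for x in allowed_statuses}
--
--     def subscore(r: dict) -> Tuple[int, int, str]:
--         return (0 if r.get("disambiguation") else 1,
--                 1 if r.get("country") else 0,
--                 r.get("date") or "9999-99-99")
--
--     candidates = [r for r in releases
--                   if (r.get("status") or "").casefold() in allowed]
--     pool = candidates if candidates else releases
--     best = pool[0]
--     for r in pool[1:]:
--         if subscore(r) > subscore(best):
--             best = r
--     return best
-- ===== Notes on version B (the rewrite author's own statement) =====
-- stated objective: alternative
-- what changed: Replaces the sort-by-4-tuple-then-rescan with a two-stage plan: filter the releases whose status is allowed (they dominate all others), then one linear argmax over that pool (or over all releases if none is allowed) using a status-free 3-part sub-score; strict comparison keeps the earliest of tied elements like the stable sort.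
import Mathlib
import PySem

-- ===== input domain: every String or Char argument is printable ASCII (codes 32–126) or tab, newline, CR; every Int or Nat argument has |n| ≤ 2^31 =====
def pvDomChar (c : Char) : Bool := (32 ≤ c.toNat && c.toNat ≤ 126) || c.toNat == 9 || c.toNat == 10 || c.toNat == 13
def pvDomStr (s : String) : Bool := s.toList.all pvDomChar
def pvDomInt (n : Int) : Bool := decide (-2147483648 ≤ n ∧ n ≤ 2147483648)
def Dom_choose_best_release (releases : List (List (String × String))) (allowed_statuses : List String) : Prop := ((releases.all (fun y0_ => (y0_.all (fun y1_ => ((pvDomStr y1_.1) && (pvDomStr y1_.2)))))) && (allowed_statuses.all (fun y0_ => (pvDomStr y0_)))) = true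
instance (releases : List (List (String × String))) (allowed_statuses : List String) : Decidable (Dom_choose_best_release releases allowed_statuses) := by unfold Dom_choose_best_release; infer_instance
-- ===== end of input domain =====

-- B replaces A's sort-by-4-tuple-then-rescan by: filter the allowed-status releases,
-- then a single linear argmax of a status-free 3-part sub-score over that pool
-- (over all releases if no status is allowed). Objective: alternative (no sort, no rescan).
-- str.casefold is ported as PySem.Str.lower — exact on the ASCII domain above.

-- ===== PORT A =====
-- Python's `x or d` for an optional string value (None and "" both fall back to d)
def pvOrStr (o : Option String) (d : String) : String :=
  match o with
  | some s => if s = "" then d else s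
  | none => d

-- the set `{x.casefold() for x in allowed_statuses}`
def pvAllowedSet (allowed_statuses : List String) : PySem.Set String :=
  PySem.Set.ofList (allowed_statuses.map (fun x => PySem.Str.lower x))

-- `(r.get("status") or "").casefold()`
def pvStatusCf (r : List (String × String)) : String :=
  PySem.Str.lower (pvOrStr ((PySem.Dict.ofList r).get? "status") "")

-- the inner `score` helper; the 4-tuple is a plain product
def pvScore (allowed : PySem.Set String) (r : List (String × String)) :
    Int × Int × Int × String :=
  let d := PySem.Dict.ofList r
  let status := pvStatusCf r
  let status_bonus : Int := if allowed.contains status then 10 else 0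
  let disambig_bonus : Int := if pvOrStr (d.get? "disambiguation") "" ≠ "" then 0 else 1
  let country_bonus : Int := if pvOrStr (d.get? "country") "" ≠ "" then 1 else 0
  let date := pvOrStr (d.get? "date") "9999-99-99"
  (status_bonus, disambig_bonus, country_bonus, date)

-- Python's `<` on the 4-tuple, written out componentwise (hand port: Lean's `<` on
-- products is pointwise, not lexicographic; exact — String `<` is Python's str `<`)
abbrev pvTupLtP (a b : Int × Int × Int × String) : Prop :=
  a.1 < b.1 ∨ (a.1 = b.1 ∧
    (a.2.1 < b.2.1 ∨ (a.2.1 = b.2.1 ∧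
      (a.2.2.1 < b.2.2.1 ∨ (a.2.2.1 = b.2.2.1 ∧ a.2.2.2 < b.2.2.2)))))

def pvTupLt (a b : Int × Int × Int × String) : Bool := decide (pvTupLtP a b)

-- the `for r in releases_sorted: if … return r` loop
def pvLoopA (allowed : PySem.Set String) :
    List (List (String × String)) → Option (List (String × String))
  | [] => none
  | r :: rest =>
      if allowed.contains (pvStatusCf r) then some r else pvLoopA allowed rest

def choose_best_release (releases : List (List (String × String))) (allowed_statuses : List String) : Option (List (String × String)) :=
  if releases = [] then none
  else
    let allowed := pvAllowedSet allowed_statuses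
    -- sorted(releases, key=score, reverse=True): PySem's stable insertion sort
    -- (this foldl of insertBy IS PySem.List.sorted … true;
    -- written out because the key is a tuple compared with Python's lexicographic `<`)
    let releases_sorted := releases.foldl
      (fun acc x => PySem.List.insertBy
        (fun a b => pvTupLt (pvScore allowed b) (pvScore allowed a)) x acc) []
    match pvLoopA allowed releases_sorted with
    | some r => some r
    | none => PySem.List.pyGet? releases_sorted 0

-- ===== PORT B =====
-- Source B's `subscore`: the status-free 3-part key
def pvSubScore (r : List (String × String)) : Int × Int × String :=
  ((if pvOrStr ((PySem.Dict.ofList r).get? "disambiguation") "" ≠ "" then 0 else 1 : Int),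
   (if pvOrStr ((PySem.Dict.ofList r).get? "country") "" ≠ "" then 1 else 0 : Int),
   pvOrStr ((PySem.Dict.ofList r).get? "date") "9999-99-99")

-- Python's `<` on the 3-tuple, lexicographic
abbrev pvLt3P (a b : Int × Int × String) : Prop :=
  a.1 < b.1 ∨ (a.1 = b.1 ∧ (a.2.1 < b.2.1 ∨ (a.2.1 = b.2.1 ∧ a.2.2 < b.2.2)))

def pvLt3 (a b : Int × Int × String) : Bool := decide (pvLt3P a b)

-- `(r.get("status") or "").casefold() in allowed`
def pvIsAllowed (allowed : PySem.Set String) (r : List (String × String)) : Bool :=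
  allowed.contains (PySem.Str.lower (pvOrStr ((PySem.Dict.ofList r).get? "status") ""))

def choose_best_release_alt (releases : List (List (String × String))) (allowed_statuses : List String) : Option (List (String × String)) :=
  match releases with
  | [] => none
  | _ :: _ =>
      let allowed := PySem.Set.ofList (allowed_statuses.map (fun x => PySem.Str.lower x))
      let candidates := releases.filter (fun r => pvIsAllowed allowed r)
      let pool := if candidates = [] then releases else candidates
      match pool with
      | [] => none   -- unreachable: pool is nonempty since releases is
      | p0 :: ps =>
          some (ps.foldl
            (fun best r => if pvLt3 (pvSubScore best) (pvSubScore r) then r else best) p0)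

-- ===== PRECONDITION & SPEC =====
def Spec_choose_best_release (releases : List (List (String × String))) (allowed_statuses : List String) (out : Option (List (String × String))) : Prop := out = choose_best_release_alt releases allowed_statuses
instance (releases : List (List (String × String))) (allowed_statuses : List String) (out : Option (List (String × String))) : Decidable (Spec_choose_best_release releases allowed_statuses out) := by unfold Spec_choose_best_release; infer_instance

-- ===== CLAIM (what is proved, stated in full; the proofs are below) =====
def Claim_equal_choose_best_release : Prop := ∀ (releases : List (List (String × String))) (allowed_statuses : List String), Dom_choose_best_release releases allowed_statuses → Spec_choose_best_release releases allowed_statuses (choose_best_release releases allowed_statuses)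

-- ===== LEMMAS AND PROOFS =====

theorem pvTupLt_asymm {a b : Int × Int × Int × String}
    (h : pvTupLt a b = true) : pvTupLt b a = false := by
  simp only [pvTupLt, decide_eq_true_eq, decide_eq_false_iff_not, pvTupLtP] at h ⊢
  rcases h with h | ⟨e1, h | ⟨e2, h | ⟨e3, h⟩⟩⟩ <;>
    rintro (h' | ⟨e1', h' | ⟨e2', h' | ⟨e3', h'⟩⟩⟩) <;>
      first
        | omega
        | exact absurd (h.trans h') (lt_irrefl _)

theorem pvTupLt_trans {a b c : Int × Int × Int × String}
    (h1 : pvTupLt a b = true) (h2 : pvTupLt b c = true) : pvTupLt a c = true := by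
  simp only [pvTupLt, decide_eq_true_eq, pvTupLtP] at h1 h2 ⊢
  rcases h1 with h1 | ⟨e1, h1 | ⟨e2, h1 | ⟨e3, h1⟩⟩⟩ <;>
    rcases h2 with h2 | ⟨f1, h2 | ⟨f2, h2 | ⟨f3, h2⟩⟩⟩ <;>
      first
        | omega
        | (left; omega)
        | (right; refine ⟨by omega, ?_⟩; left; omega)
        | (right; refine ⟨by omega, ?_⟩; right; refine ⟨by omega, ?_⟩; left; omega)
        | (right; refine ⟨by omega, ?_⟩; right; refine ⟨by omega, ?_⟩; right;
           refine ⟨by omega, ?_⟩; first | assumption | exact h1.trans h2)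

-- A's 4-part score is the allowed bonus paired with B's sub-score
theorem pvScore_eq (allowed : PySem.Set String) (r : List (String × String)) :
    pvScore allowed r
      = ((if pvIsAllowed allowed r then (10 : Int) else 0), pvSubScore r) := by
  simp [pvScore, pvSubScore, pvIsAllowed, pvStatusCf]

-- the 4-tuple comparison in terms of allowed-ness and the 3-part sub-score
theorem pvLt4_cases (allowed : PySem.Set String) (a b : List (String × String)) :
    pvTupLt (pvScore allowed a) (pvScore allowed b)
      = (if pvIsAllowed allowed a then
           (if pvIsAllowed allowed b then pvLt3 (pvSubScore a) (pvSubScore b) else false)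
         else
           (if pvIsAllowed allowed b then true else pvLt3 (pvSubScore a) (pvSubScore b))) := by
  rw [pvScore_eq, pvScore_eq]
  by_cases ha : pvIsAllowed allowed a <;> by_cases hb : pvIsAllowed allowed b <;>
    simp [ha, hb, pvTupLt, pvLt3, pvTupLtP, pvLt3P]

-- head of a foldl of insertBy is the strict-comparison running best
theorem pvHead_foldl_insertBy {α : Type} (bf : α → α → Bool)
    (xs : List α) (m : α) (acc : List α) :
    ∃ t, xs.foldl (fun acc x => PySem.List.insertBy bf x acc) (m :: acc)
          = (xs.foldl (fun best x => if bf x best then x else best) m) :: t := by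
  induction xs generalizing m acc with
  | nil => exact ⟨acc, rfl⟩
  | cons x xs ih =>
      simp only [List.foldl_cons]
      by_cases h : bf x m
      · simpa [PySem.List.insertBy, h] using ih x (m :: acc)
      · simpa [PySem.List.insertBy, h] using ih m (PySem.List.insertBy bf x acc)

-- head-dominance: no element of the tail is strictly greater than the head
def pvHeadDom (lt' : List (String × String) → List (String × String) → Bool) :
    List (List (String × String)) → Prop
  | [] => True
  | m :: t => ∀ y ∈ t, lt' m y = false

theorem pvHeadDom_insertBy
    (key : List (String × String) → Int × Int × Int × String)
    (x : List (String × String)) (l : List (List (String × String)))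
    (h : pvHeadDom (fun a b => pvTupLt (key a) (key b)) l) :
    pvHeadDom (fun a b => pvTupLt (key a) (key b))
      (PySem.List.insertBy (fun a b => pvTupLt (key b) (key a)) x l) := by
  match l with
  | [] => intro y hy; simp at hy
  | m :: t =>
      by_cases hx : pvTupLt (key m) (key x)
      · simp only [PySem.List.insertBy, hx, if_pos]
        intro y hy
        rcases List.mem_cons.mp hy with rfl | hy
        · exact pvTupLt_asymm hx
        · by_contra hc
          have hxy : pvTupLt (key x) (key y) = true := by simpa using hc
          have hmy : pvTupLt (key m) (key y) = false := by simpa using h y hy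
          exact absurd ((pvTupLt_trans hx hxy).symm.trans hmy) (by simp)
      · simp only [PySem.List.insertBy, hx]
        rw [if_neg (by simpa using hx)]
        intro y hy
        rcases (PySem.List.mem_insertBy _ _ _ _).mp hy with rfl | hy
        · simp at hx; simp [hx]
        · exact h y hy

theorem pvHeadDom_foldl
    (key : List (String × String) → Int × Int × Int × String)
    (xs : List (List (String × String))) (l : List (List (String × String)))
    (h : pvHeadDom (fun a b => pvTupLt (key a) (key b)) l) :
    pvHeadDom (fun a b => pvTupLt (key a) (key b))
      (xs.foldl (fun acc x => PySem.List.insertBy (fun a b => pvTupLt (key b) (key a)) x acc) l) := by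
  induction xs generalizing l with
  | nil => exact h
  | cons x xs ih => exact ih _ (pvHeadDom_insertBy key x l h)

-- the A-side scan returns none iff no element has an allowed status
theorem pvLoopA_eq_none (allowed : PySem.Set String)
    (xs : List (List (String × String)))
    (h : ∀ r ∈ xs, pvIsAllowed allowed r = false) :
    pvLoopA allowed xs = none := by
  induction xs with
  | nil => rfl
  | cons r rest ih =>
      have hr : allowed.contains (pvStatusCf r) = false := h r (by simp)
      simp only [pvLoopA, hr, Bool.false_eq_true, if_false]
      exact ih (fun r' hr' => h r' (by simp [hr']))

-- abbreviations used only in the proofs below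
def pvG4 (allowed : PySem.Set String)
    (best r : List (String × String)) : List (String × String) :=
  if pvTupLt (pvScore allowed best) (pvScore allowed r) then r else best

def pvG3 (best r : List (String × String)) : List (String × String) :=
  if pvLt3 (pvSubScore best) (pvSubScore r) then r else best

-- step (i): A returns the running argmax of the 4-part score
theorem pvA_eq_argmax (allowed_statuses : List String)
    (r0 : List (String × String)) (rest : List (List (String × String))) :
    choose_best_release (r0 :: rest) allowed_statuses
      = some (rest.foldl (pvG4 (pvAllowedSet allowed_statuses)) r0) := by
  set allowed := pvAllowedSet allowed_statuses with hallowed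
  set key := pvScore allowed with hkey
  set best := rest.foldl (pvG4 allowed) r0 with hbest
  obtain ⟨t, ht⟩ := pvHead_foldl_insertBy
    (fun a b => pvTupLt (key b) (key a)) rest r0 ([] : List (List (String × String)))
  have hsrt : (r0 :: rest).foldl
      (fun acc x => PySem.List.insertBy (fun a b => pvTupLt (key b) (key a)) x acc) []
      = best :: t := by
    simp only [List.foldl_cons, PySem.List.insertBy]
    rw [ht]; rfl
  have hdom := pvHeadDom_foldl key (r0 :: rest) [] trivial
  rw [hsrt] at hdom
  have hged : ∀ y ∈ t, pvTupLt (key best) (key y) = false := hdom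
  show choose_best_release (r0 :: rest) allowed_statuses = some best
  unfold choose_best_release
  rw [if_neg (by simp)]
  simp only [← hallowed, ← hkey, hsrt]
  by_cases hb : pvIsAllowed allowed best
  · have hb' : pvStatusCf best ∈ allowed := by
      have h1 : allowed.contains (pvStatusCf best) = true := hb
      simpa [PySem.Set.contains] using h1
    simp [pvLoopA, hb']
  · have hnone : ∀ y ∈ t, pvIsAllowed allowed y = false := by
      intro y hy
      by_contra hc
      have hyA : pvIsAllowed allowed y = true := by simpa using hc
      have h1 := hged y hy
      have hlt : pvTupLt (key best) (key y) = true := by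
        rw [hkey, pvLt4_cases, if_neg (by simpa using hb), if_pos hyA]
      rw [h1] at hlt; exact absurd hlt (by simp)
    have hall : pvLoopA allowed (best :: t) = none := by
      apply pvLoopA_eq_none
      intro r hr
      rcases List.mem_cons.mp hr with h | h
      · rw [h]; simpa using hb
      · exact hnone r h
    rw [hall]
    simp [PySem.List.pyGet?, PySem.List.pyIdx?]

-- step (ii)a: starting from an allowed best, the 4-part argmax only ever visits
-- allowed elements and agrees with the 3-part argmax over the filtered list
theorem pvFold_allowed (allowed : PySem.Set String)
    (xs : List (List (String × String))) (m : List (String × String))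
    (hm : pvIsAllowed allowed m = true) :
    xs.foldl (pvG4 allowed) m = (xs.filter (fun r => pvIsAllowed allowed r)).foldl pvG3 m := by
  induction xs generalizing m with
  | nil => rfl
  | cons x xs ih =>
      cases hx : pvIsAllowed allowed x with
      | true =>
          have hstep : pvG4 allowed m x = pvG3 m x := by
            simp [pvG4, pvG3, pvLt4_cases, hm, hx]
          have hmem : pvIsAllowed allowed (pvG3 m x) = true := by
            unfold pvG3; split <;> [exact hx; exact hm]
          simp only [List.foldl_cons, List.filter_cons, hx, if_pos, hstep]
          rw [ih _ hmem]
      | false =>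
          have hstep : pvG4 allowed m x = m := by
            simp [pvG4, pvLt4_cases, hm, hx]
          simp only [List.foldl_cons, List.filter_cons, hx, Bool.false_eq_true, if_false, hstep]
          exact ih _ hm

-- step (ii)b: starting from a non-allowed best, the 4-part argmax equals the
-- 3-part argmax over the filtered list (over the whole list if the filter is empty)
theorem pvFold_free (allowed : PySem.Set String)
    (xs : List (List (String × String))) (m : List (String × String))
    (hm : pvIsAllowed allowed m = false) :
    xs.foldl (pvG4 allowed) m
      = (match xs.filter (fun r => pvIsAllowed allowed r) with
         | [] => xs.foldl pvG3 m
         | c :: cs => cs.foldl pvG3 c) := by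
  induction xs generalizing m with
  | nil => rfl
  | cons x xs ih =>
      cases hx : pvIsAllowed allowed x with
      | true =>
          have hstep : pvG4 allowed m x = x := by
            simp [pvG4, pvLt4_cases, hm, hx]
          simp only [List.foldl_cons, List.filter_cons, hx, if_pos, hstep]
          exact pvFold_allowed allowed xs x hx
      | false =>
          have hstep : pvG4 allowed m x = pvG3 m x := by
            simp [pvG4, pvG3, pvLt4_cases, hm, hx]
          have hmem : pvIsAllowed allowed (pvG3 m x) = false := by
            unfold pvG3; split <;> [exact hx; exact hm]
          simp only [List.foldl_cons, List.filter_cons, hx, Bool.false_eq_true, if_false, hstep]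
          rw [ih _ hmem]

-- ===== VERDICT (by name: the statement is the Claim_ definition above) =====
theorem choose_best_release_spec : Claim_equal_choose_best_release := by
  unfold Claim_equal_choose_best_release Spec_choose_best_release
  intro releases allowed_statuses _
  match releases with
  | [] => rfl
  | r0 :: rest =>
    rw [pvA_eq_argmax]
    unfold choose_best_release_alt
    rw [show PySem.Set.ofList (allowed_statuses.map (fun x => PySem.Str.lower x))
          = pvAllowedSet allowed_statuses from rfl]
    cases h0 : pvIsAllowed (pvAllowedSet allowed_statuses) r0 with
    | true =>
        rw [pvFold_allowed _ rest r0 h0]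
        simp only [List.filter_cons, h0, if_pos]
        rfl
    | false =>
        rw [pvFold_free _ rest r0 h0]
        simp only [List.filter_cons, h0, Bool.false_eq_true, if_false]
        cases hf : rest.filter (fun r => pvIsAllowed (pvAllowedSet allowed_statuses) r) with
        | nil => rfl
        | cons c cs => rfl
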